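-- pv_equiv track=rewrite | github.com/sony/oms | src/tools.py | get_meaningful_segments
-- ===== SOURCE A (Python) =====
-- from typing import List, Any, Dict, Optional, Type, Tuple
--
-- def get_meaningful_segments(tokens: List[str], is_prefix: bool = True, max_length: int = 2) -> List[str]:
--     """
--     Extract meaningful segments (prefixes or suffixes) from tokens.
--
--     Args:
--         tokens: List of merged tokens.
--         is_prefix: If True, extract prefixes; if False, extract suffixes.
--         max_length: Maximum number of tokens to consider.
--
--     Returns:
--         List of extracted segments.
--     """
--     if not tokens:
--         return []
--
--     segments = []
--
--     # Get segments of different lengths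
--     for i in range(1, min(max_length + 1, len(tokens) + 1)):
--         if is_prefix:
--             segment = " ".join(tokens[:i])
--         else:
--             segment = " ".join(tokens[-i:])
--         segments.append(segment)
--
--     return segments
-- ===== SOURCE B (Python) =====
-- def get_meaningful_segments(tokens, is_prefix=True, max_length=2):
--     limit = min(max_length, len(tokens))
--     if limit <= 0:
--         return []
--     segments = []
--     if is_prefix:
--         current = tokens[0]
--         segments.append(current)
--         for tok in tokens[1:limit]:
--             current = current + " " + tok
--             segments.append(current)
--     else:
--         current = tokens[-1]
--         segments.append(current)
--         for tok in reversed(tokens[len(tokens) - limit:len(tokens) - 1]):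
--             current = tok + " " + current
--             segments.append(current)
--     return segments
-- ===== Notes on version B (the rewrite author's own statement) =====
-- stated objective: faster
-- what changed: B threads a running concatenation through one pass (extending the prefix with ' '+token, or prepending token+' ' for suffixes) instead of re-slicing and re-joining the whole segment at every iteration, and replaces the empty-list guard by a single limit<=0 check.
import Mathlib
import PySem

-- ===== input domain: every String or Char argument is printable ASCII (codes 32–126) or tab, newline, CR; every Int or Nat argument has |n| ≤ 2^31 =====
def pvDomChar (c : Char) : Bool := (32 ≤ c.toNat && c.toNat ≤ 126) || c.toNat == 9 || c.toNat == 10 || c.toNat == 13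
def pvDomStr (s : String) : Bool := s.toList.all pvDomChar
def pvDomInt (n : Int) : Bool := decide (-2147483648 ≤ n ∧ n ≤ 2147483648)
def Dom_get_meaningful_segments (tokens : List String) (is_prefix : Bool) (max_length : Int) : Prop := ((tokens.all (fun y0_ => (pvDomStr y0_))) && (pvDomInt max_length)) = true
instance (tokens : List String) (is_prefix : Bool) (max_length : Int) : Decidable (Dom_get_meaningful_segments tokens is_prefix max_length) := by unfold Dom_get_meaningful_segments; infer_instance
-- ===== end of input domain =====

-- B builds each segment by extending a running concatenation in one pass instead of
-- re-slicing and re-joining the whole prefix/suffix at every iteration (constant-factor speedup).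

-- ===== PORT A =====
def get_meaningful_segments (tokens : List String) (is_prefix : Bool) (max_length : Int) : List String :=
  if tokens = [] then []
  else
    (PySem.List.pyRange 1 (min (max_length + 1) (PySem.List.len tokens + 1)) 1).foldl
      (fun segments i =>
        segments ++ [if is_prefix then PySem.Str.join " " (PySem.List.slice tokens none (some i))
                     else PySem.Str.join " " (PySem.List.slice tokens (some (-i)) none)]) []

-- ===== PORT B =====
-- loop body of B's prefix pass: current = current + " " + tok; segments.append(current)
def pvExtendFwd (st : String × List String) (tok : String) : String × List String :=
  (st.1 ++ " " ++ tok, st.2 ++ [st.1 ++ " " ++ tok])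

-- loop body of B's suffix pass: current = tok + " " + current; segments.append(current)
def pvExtendBwd (st : String × List String) (tok : String) : String × List String :=
  (tok ++ " " ++ st.1, st.2 ++ [tok ++ " " ++ st.1])

def get_meaningful_segments_alt (tokens : List String) (is_prefix : Bool) (max_length : Int) : List String :=
  let limit := min max_length (PySem.List.len tokens)
  if limit ≤ 0 then []
  else if is_prefix then
    let c0 := PySem.List.pyGetD tokens 0 ""     -- tokens[0]; in range since limit > 0
    ((PySem.List.slice tokens (some 1) (some limit)).foldl pvExtendFwd (c0, [c0])).2
  else
    let c0 := PySem.List.pyGetD tokens (-1) ""  -- tokens[-1]; in range since limit > 0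
    (((PySem.List.slice tokens (some (PySem.List.len tokens - limit)) (some (PySem.List.len tokens - 1))).reverse).foldl
      pvExtendBwd (c0, [c0])).2

-- ===== PRECONDITION & SPEC =====
def Spec_get_meaningful_segments (tokens : List String) (is_prefix : Bool) (max_length : Int) (out : List String) : Prop := out = get_meaningful_segments_alt tokens is_prefix max_length
instance (tokens : List String) (is_prefix : Bool) (max_length : Int) (out : List String) : Decidable (Spec_get_meaningful_segments tokens is_prefix max_length out) := by unfold Spec_get_meaningful_segments; infer_instance

-- ===== CLAIM (what is proved, stated in full; the proofs are below) =====
def Claim_equal_get_meaningful_segments : Prop := ∀ (tokens : List String) (is_prefix : Bool) (max_length : Int), Dom_get_meaningful_segments tokens is_prefix max_length → Spec_get_meaningful_segments tokens is_prefix max_length (get_meaningful_segments tokens is_prefix max_length)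

-- ===== LEMMAS AND PROOFS =====

-- join over List Char splits across a nonempty/nonempty append
theorem pvCharsJoinAppend (sep : List Char) (as bs : List (List Char)) (ha : as ≠ []) (hb : bs ≠ []) :
    PySem.Chars.join sep (as ++ bs) = PySem.Chars.join sep as ++ sep ++ PySem.Chars.join sep bs := by
  induction as with
  | nil => exact absurd rfl ha
  | cons a as ih =>
    cases as with
    | nil =>
      cases bs with
      | nil => exact absurd rfl hb
      | cons b bs => simp [PySem.Chars.join_cons_cons, PySem.Chars.join_singleton]
    | cons a2 as2 =>
      have := ih (by simp)
      simp only [List.cons_append, PySem.Chars.join_cons_cons] at *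
      simp [this]

theorem pvSJoinSingleton (c : String) : PySem.Str.join " " [c] = c := by
  apply String.toList_inj.mp
  simp [PySem.Str.toList_join, PySem.Chars.join_singleton]

theorem pvSJoinPair (a b : String) : PySem.Str.join " " [a, b] = a ++ " " ++ b := by
  apply String.toList_inj.mp
  simp [PySem.Str.toList_join, PySem.Chars.join_cons_cons, PySem.Chars.join_singleton,
    String.toList_append]

theorem pvSJoinMergeHead (c y : String) (zs : List String) :
    PySem.Str.join " " ((c ++ " " ++ y) :: zs) = PySem.Str.join " " (c :: y :: zs) := by
  apply String.toList_inj.mp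
  simp only [PySem.Str.toList_join, List.map_cons, String.toList_append]
  cases zs with
  | nil => simp [PySem.Chars.join_singleton, PySem.Chars.join_cons_cons]
  | cons z zs => simp [PySem.Chars.join_cons_cons]

theorem pvSJoinMergeLast (zs : List String) (y c : String) :
    PySem.Str.join " " (zs ++ [y ++ " " ++ c]) = PySem.Str.join " " (zs ++ [y, c]) := by
  apply String.toList_inj.mp
  simp only [PySem.Str.toList_join, List.map_append, List.map_cons, List.map_nil, String.toList_append]
  cases zs with
  | nil => simp [PySem.Chars.join_singleton, PySem.Chars.join_cons_cons]
  | cons z zs =>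
    rw [pvCharsJoinAppend _ _ _ (by simp) (by simp), pvCharsJoinAppend _ _ _ (by simp) (by simp)]
    simp [PySem.Chars.join_singleton, PySem.Chars.join_cons_cons]

-- B's forward pass, characterised: running value and emitted segments
theorem pvFwdFold (ys : List String) (c : String) (acc : List String) :
    ys.foldl pvExtendFwd (c, acc) =
      (PySem.Str.join " " (c :: ys),
       acc ++ (List.range ys.length).map (fun k => PySem.Str.join " " (c :: ys.take (k + 1)))) := by
  induction ys generalizing c acc with
  | nil => simp [pvSJoinSingleton]
  | cons y ys ih =>
    simp only [List.foldl_cons, pvExtendFwd, List.length_cons]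
    rw [ih]
    refine congrArg₂ Prod.mk (pvSJoinMergeHead c y ys) ?_
    have hmap : (List.range (ys.length + 1)).map
          (fun k => PySem.Str.join " " (c :: (y :: ys).take (k + 1))) =
        (c ++ " " ++ y) ::
          (List.range ys.length).map
            (fun k => PySem.Str.join " " ((c ++ " " ++ y) :: ys.take (k + 1))) := by
      rw [List.range_succ_eq_map, List.map_cons, List.map_map]
      refine congrArg₂ List.cons ?_ ?_
      · simp only [List.take_succ_cons, List.take_zero]
        exact pvSJoinPair c y
      · apply List.map_congr_left
        intro k _
        simp only [Function.comp_apply, Nat.succ_eq_add_one, List.take_succ_cons]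
        exact (pvSJoinMergeHead c y _).symm
    rw [hmap, List.append_assoc]
    rfl

-- B's backward pass, characterised
theorem pvBwdFold (ys : List String) (c : String) (acc : List String) :
    ys.foldl pvExtendBwd (c, acc) =
      (PySem.Str.join " " (ys.reverse ++ [c]),
       acc ++ (List.range ys.length).map (fun k => PySem.Str.join " " ((ys.take (k + 1)).reverse ++ [c]))) := by
  induction ys generalizing c acc with
  | nil => simp [pvSJoinSingleton]
  | cons y ys ih =>
    simp only [List.foldl_cons, pvExtendBwd, List.length_cons]
    rw [ih]
    refine congrArg₂ Prod.mk ?_ ?_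
    · simp only [List.reverse_cons]
      rw [List.append_assoc]
      simpa using pvSJoinMergeLast ys.reverse y c
    · have hmap : (List.range (ys.length + 1)).map
            (fun k => PySem.Str.join " " (((y :: ys).take (k + 1)).reverse ++ [c])) =
          (y ++ " " ++ c) ::
            (List.range ys.length).map
              (fun k => PySem.Str.join " " ((ys.take (k + 1)).reverse ++ [y ++ " " ++ c])) := by
        rw [List.range_succ_eq_map, List.map_cons, List.map_map]
        refine congrArg₂ List.cons ?_ ?_
        · simp only [List.take_succ_cons, List.take_zero, List.reverse_cons, List.reverse_nil,
            List.nil_append]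
          exact pvSJoinPair y c
        · apply List.map_congr_left
          intro k _
          simp only [Function.comp_apply, Nat.succ_eq_add_one, List.take_succ_cons,
            List.reverse_cons]
          rw [List.append_assoc]
          simpa using (pvSJoinMergeLast (List.take (k + 1) ys).reverse y c).symm
      rw [hmap, List.append_assoc]
      rfl

theorem pvPyRangeEmpty (a b : Int) (h : b ≤ a) : PySem.List.pyRange a b 1 = [] := by
  simp only [PySem.List.pyRange, if_neg (by norm_num : ¬ (1 : Int) = 0),
    if_pos (by norm_num : (0 : Int) < 1), if_neg (by omega : ¬ a < b)]
  simp

theorem pvPyRangeShift (L : Nat) : ∀ a : Int, PySem.List.pyRange a (a + (L : Int)) 1 =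
    (List.range L).map (fun (k : Nat) => a + (k : Int)) := by
  induction L with
  | zero => intro a; simp [pvPyRangeEmpty]
  | succ m ih =>
    intro a
    rw [PySem.List.pyRange_one_cons (by push_cast; omega : a < a + ((m + 1 : Nat) : Int))]
    rw [show a + ((m + 1 : Nat) : Int) = (a + 1) + (m : Int) by push_cast; ring]
    rw [ih (a + 1)]
    rw [List.range_succ_eq_map, List.map_cons, List.map_map]
    congr 1
    · norm_num
    · apply List.map_congr_left
      intro k _
      simp only [Function.comp_apply, Nat.succ_eq_add_one]
      push_cast
      ring

-- ===== VERDICT (by name: the statement is the Claim_ definition above) =====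
theorem get_meaningful_segments_spec : Claim_equal_get_meaningful_segments := by
  intro tokens is_prefix max_length _
  unfold Spec_get_meaningful_segments get_meaningful_segments get_meaningful_segments_alt
  simp only [PySem.List.len_eq]
  by_cases htok : tokens = []
  · subst htok; simp
  · rw [if_neg htok]
    set n : Nat := tokens.length with hn
    have hnpos : 0 < n := by
      cases tokens with
      | nil => exact absurd rfl htok
      | cons a l => simp [hn]
    by_cases hlim : min max_length (n : Int) ≤ 0
    · rw [if_pos hlim]
      rw [pvPyRangeEmpty _ _ (by omega : min (max_length + 1) ((n : Int) + 1) ≤ 1)]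
      simp
    · rw [if_neg hlim]
      push_neg at hlim
      set limit : Int := min max_length (n : Int) with hlimdef
      set L : Nat := limit.toNat with hL
      have hLcast : (L : Int) = limit := by omega
      have hL1 : 1 ≤ L := by omega
      have hLn : L ≤ n := by omega
      rw [show min (max_length + 1) ((n : Int) + 1) = 1 + (L : Int) by omega]
      rw [PySem.List.foldl_append_singleton_eq_map, pvPyRangeShift L 1, List.map_map,
        List.nil_append]
      cases is_prefix with
      | true =>
        simp only [if_pos]
        rw [PySem.List.slice_toNat _ (by norm_num) (by omega), pvFwdFold]
        cases tokens with
        | nil => exact absurd rfl htok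
        | cons t ts =>
        rw [PySem.List.pyGetD_zero_cons]
        have hn' : n = ts.length + 1 := by simp [hn]
        simp only [Int.toNat_one, List.drop_succ_cons, List.drop_zero, List.nil_append]
        have hyslen : (ts.take (limit.toNat - 1)).length = L - 1 := by
          simp only [List.length_take]; omega
        rw [hyslen]
        rw [show L = (L - 1) + 1 by omega, List.range_succ_eq_map, List.map_cons, List.map_map]
        congr 1
        · simp only [Function.comp_apply, Nat.cast_zero, add_zero]
          rw [show (1 : Int) = ((1 : Nat) : Int) by norm_num, PySem.List.slice_to_natCast]
          simp [pvSJoinSingleton]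
        · apply List.map_congr_left
          intro k hk
          simp only [List.mem_range] at hk
          simp only [Function.comp_apply, Nat.succ_eq_add_one]
          rw [show (1 : Int) + ((k + 1 : Nat) : Int) = ((k + 2 : Nat) : Int) by push_cast; ring]
          rw [PySem.List.slice_to_natCast]
          rw [List.take_succ_cons, List.take_take,
            show min (k + 1) (limit.toNat - 1) = k + 1 by omega]
      | false =>
        simp only [Bool.false_eq_true, if_neg, reduceIte]
        rw [PySem.List.pyGetD_neg_one _ _ htok]
        rw [PySem.List.slice_toNat _ (by omega) (by omega), pvBwdFold]
        set m : List String := List.take (((n : Int) - 1).toNat - ((n : Int) - limit).toNat)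
            (List.drop ((n : Int) - limit).toNat tokens) with hm
        have hdroplen : (List.drop ((n : Int) - limit).toNat tokens).length = L := by
          simp only [List.length_drop, ← hn]; omega
        have hmlen : m.length = L - 1 := by
          rw [hm]; simp only [List.length_take, hdroplen]; omega
        rw [List.length_reverse, hmlen]
        rw [show L = (L - 1) + 1 by omega, List.range_succ_eq_map, List.map_cons, List.map_map]
        simp only [List.nil_append]
        congr 1
        · simp only [Function.comp_apply, Nat.cast_zero, add_zero]
          rw [show (-(1 : Int)) = (-((1 : Nat) : Int)) by norm_num]
          rw [PySem.List.slice_from_neg_natCast _ _ (by omega)]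
          rw [← hn, List.drop_length_sub_one htok, pvSJoinSingleton]
        · apply List.map_congr_left
          intro k hk
          simp only [List.mem_range] at hk
          simp only [Function.comp_apply, Nat.succ_eq_add_one]
          rw [show (-((1 : Int) + ((k + 1 : Nat) : Int))) = (-((k + 2 : Nat) : Int)) by push_cast; ring]
          rw [PySem.List.slice_from_neg_natCast _ _ (by omega)]
          rw [← hn]
          congr 1
          rw [List.take_reverse, List.reverse_reverse, hmlen]
          rw [hm, List.drop_take]
          rw [List.drop_drop]
          rw [show ((n : Int) - limit).toNat + (L - 1 - (k + 1)) = n - (k + 2) by omega]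
          have hlen2 : (List.drop (n - (k + 2)) tokens).length = k + 2 := by
            simp only [List.length_drop, ← hn]; omega
          have hne2 : List.drop (n - (k + 2)) tokens ≠ [] := by
            intro h; rw [h] at hlen2; simp at hlen2
          rw [show ((n : Int) - 1).toNat - ((n : Int) - limit).toNat - (L - 1 - (k + 1)) = k + 1 by omega]
          rw [show tokens.getLast htok = (List.drop (n - (k + 2)) tokens).getLast hne2 from
            (List.getLast_drop hne2).symm]
          rw [show List.take (k + 1) (List.drop (n - (k + 2)) tokens) =
              (List.drop (n - (k + 2)) tokens).dropLast by rw [List.dropLast_eq_take, hlen2]; norm_num]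
          exact (List.dropLast_append_getLast hne2).symm
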